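-- pv_equiv track=rewrite | github.com/saydontgo/2MVeri__experiment | FatTree_4.py | hex_IP
-- ===== SOURCE A (Python) =====
-- def d2h(d):
--     if d > 15:
--         return f'{hex(d)[2:]}'
--     return f'0{hex(d)[2:]}'
--
-- def hex_IP(ip):
--     res = ""
--     tmp = ""
--     for s in ip:
--         if s == '.':
--             res += d2h(int(tmp))
--             tmp = ""
--         else:
--             tmp += s
--     if tmp != "":
--         res += d2h(int(tmp))
--     return res
-- ===== SOURCE B (Python) =====
-- def d2h(d):
--     if d > 15:
--         return f'{hex(d)[2:]}'
--     return f'0{hex(d)[2:]}'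
--
-- def hex_IP(ip):
--     if ip == "":
--         return ""
--     head, sep, rest = ip.partition('.')
--     if sep == "":
--         return d2h(int(head))
--     return d2h(int(head)) + hex_IP(rest)
-- ===== Notes on version B (the rewrite author's own statement) =====
-- stated objective: alternative
-- what changed: Replaced A's char-by-char accumulator state machine with a recursive decomposition that partitions the string at the first '.' and recurses on the remainder (d2h kept verbatim).
import Mathlib
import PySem

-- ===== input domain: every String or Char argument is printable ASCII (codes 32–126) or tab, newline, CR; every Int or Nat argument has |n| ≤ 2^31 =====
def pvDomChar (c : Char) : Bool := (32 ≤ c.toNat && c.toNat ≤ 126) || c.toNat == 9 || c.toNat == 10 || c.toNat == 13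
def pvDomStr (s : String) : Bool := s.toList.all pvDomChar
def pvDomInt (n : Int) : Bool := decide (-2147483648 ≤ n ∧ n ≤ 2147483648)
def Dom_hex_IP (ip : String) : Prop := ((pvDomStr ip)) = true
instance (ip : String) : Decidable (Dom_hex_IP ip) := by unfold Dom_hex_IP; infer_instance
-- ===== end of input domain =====

-- B replaces A's char-by-char accumulator state machine by a recursive partition-at-first-dot
-- decomposition (objective: alternative, same cost; d2h kept verbatim). Return value only; no mutation.

-- ===== PORT A =====
-- hex digits of n, lowercase: exactly the digits of Python's hex(n) for n ≥ 0 (hand-ported, exact; PySem has no hex)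
def pvHexDigitsNat (n : Nat) : List Char :=
  if h : n < 16 then [Char.ofNat (if n < 10 then 48 + n else 87 + n)]
  else pvHexDigitsNat (n / 16) ++ [Char.ofNat (if n % 16 < 10 then 48 + n % 16 else 87 + n % 16)]
  decreasing_by exact Nat.div_lt_self (by omega) (by omega)

-- hex(d): "0x…" for d ≥ 0, "-0x…" for d < 0 (hand-ported, exact)
def pvHex (d : Int) : List Char :=
  if d < 0 then '-' :: '0' :: 'x' :: pvHexDigitsNat (-d).toNat
  else '0' :: 'x' :: pvHexDigitsNat d.toNat

-- d2h(d), on List Char; hex(d)[2:] is List.drop 2 (exact; both Pythons share this helper verbatim)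
def d2hL (d : Int) : List Char :=
  if d > 15 then (pvHex d).drop 2 else '0' :: (pvHex d).drop 2

-- int(tmp); PySem.Int.ofChars? = none is Python's ValueError, excluded by Pre_hex_IP
def pvIntOf (cs : List Char) : Int := (PySem.Int.ofChars? cs).getD 0

-- loop body of A: state = (res, tmp)
def hexA_step (st : List Char × List Char) (s : Char) : List Char × List Char :=
  if s = '.' then (st.1 ++ d2hL (pvIntOf st.2), []) else (st.1, st.2 ++ [s])

def hex_IP (ip : String) : String :=
  let st := ip.toList.foldl hexA_step ([], [])
  String.ofList (if st.2 ≠ [] then st.1 ++ d2hL (pvIntOf st.2) else st.1)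

-- ===== PORT B =====
-- s != '.' as a named Boolean predicate (the partition separator test)
def notDot (c : Char) : Bool := c != '.'

-- Source B: if ip == "": ""; head, sep, rest = ip.partition('.'); sep == "" ↔ no '.' found ↔ dropWhile notDot = [];
-- head = takeWhile notDot, rest = tail of dropWhile notDot (exact for the one-char separator '.')
def hexB_go (cs : List Char) : List Char :=
  if cs = [] then []
  else if h : cs.dropWhile notDot = [] then d2hL (pvIntOf (cs.takeWhile notDot))
  else d2hL (pvIntOf (cs.takeWhile notDot)) ++ hexB_go ((cs.dropWhile notDot).tail)
  termination_by cs.length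
  decreasing_by
    have h1 : (cs.dropWhile notDot).length ≤ cs.length := (List.dropWhile_sublist _).length_le
    cases hd : cs.dropWhile notDot with
    | nil => exact absurd hd h
    | cons a t => rw [hd] at h1; simp at h1 ⊢; omega

def hex_IP_alt (ip : String) : String := String.ofList (hexB_go ip.toList)

-- ===== PRECONDITION & SPEC =====
-- Pre_ excludes exactly the inputs where Python A raises ValueError: some '.'-separated token
-- (other than a single trailing empty one, which A ignores) is not a valid int() literal.
def Pre_hex_IP (ip : String) : Prop :=
  (∀ p ∈ (PySem.Chars.splitOn ip.toList ['.']).dropLast, (PySem.Int.ofChars? p).isSome) ∧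
  ((PySem.Chars.splitOn ip.toList ['.']).getLastD [] = [] ∨
    (PySem.Int.ofChars? ((PySem.Chars.splitOn ip.toList ['.']).getLastD [])).isSome)
instance (ip : String) : Decidable (Pre_hex_IP ip) := by unfold Pre_hex_IP; infer_instance
def pvWitness_hex_IP : String := "192.168.0.1"
def Spec_hex_IP (ip : String) (out : String) : Prop := out = hex_IP_alt ip
instance (ip : String) (out : String) : Decidable (Spec_hex_IP ip out) := by unfold Spec_hex_IP; infer_instance

-- ===== CLAIM (what is proved, stated in full; the proofs are below) =====
def Claim_equal_hex_IP : Prop := ∀ (ip : String), Dom_hex_IP ip → Pre_hex_IP ip → Spec_hex_IP ip (hex_IP ip)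

-- ===== LEMMAS AND PROOFS =====
theorem hexB_go_nil : hexB_go [] = [] := by rw [hexB_go]; simp

theorem hexB_go_dotless (tmp : List Char) (h : ∀ x ∈ tmp, x ≠ '.') (hne : tmp ≠ []) :
    hexB_go tmp = d2hL (pvIntOf tmp) := by
  have hb : ∀ x ∈ tmp, notDot x = true := by intro x hx; simpa [notDot] using h x hx
  have hd : tmp.dropWhile notDot = [] := List.dropWhile_eq_nil_iff.2 hb
  have ht : tmp.takeWhile notDot = tmp := List.takeWhile_eq_self_iff.2 hb
  rw [hexB_go]; simp [hne, hd, ht]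

theorem hexB_go_split (tmp cs : List Char) (h : ∀ x ∈ tmp, x ≠ '.') :
    hexB_go (tmp ++ '.' :: cs) = d2hL (pvIntOf tmp) ++ hexB_go cs := by
  have hb : ∀ x ∈ tmp, notDot x = true := by intro x hx; simpa [notDot] using h x hx
  have hd : (tmp ++ '.' :: cs).dropWhile notDot = '.' :: cs := by
    simp [List.dropWhile_append, List.dropWhile_eq_nil_iff.2 hb, notDot]
  have ht : (tmp ++ '.' :: cs).takeWhile notDot = tmp := by
    simp [List.takeWhile_append, List.takeWhile_eq_self_iff.2 hb, notDot]
  rw [hexB_go]; simp [hd, ht]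

theorem loopA_eq_hexB (cs : List Char) : ∀ (res tmp : List Char), (∀ x ∈ tmp, x ≠ '.') →
    (if (cs.foldl hexA_step (res, tmp)).2 ≠ [] then
       (cs.foldl hexA_step (res, tmp)).1 ++ d2hL (pvIntOf (cs.foldl hexA_step (res, tmp)).2)
     else (cs.foldl hexA_step (res, tmp)).1) = res ++ hexB_go (tmp ++ cs) := by
  induction cs with
  | nil =>
    intro res tmp h
    by_cases hne : tmp = []
    · simp [hne, hexB_go_nil]
    · simp [hne, hexB_go_dotless tmp h hne]
  | cons c cs ih =>
    intro res tmp h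
    by_cases hc : c = '.'
    · subst hc
      have hstep : hexA_step (res, tmp) '.' = (res ++ d2hL (pvIntOf tmp), []) := by
        simp [hexA_step]
      rw [List.foldl_cons, hstep, ih (res ++ d2hL (pvIntOf tmp)) [] (by simp),
          hexB_go_split tmp cs h]
      simp
    · have hstep : hexA_step (res, tmp) c = (res, tmp ++ [c]) := by simp [hexA_step, hc]
      rw [List.foldl_cons, hstep,
          ih res (tmp ++ [c]) (by intro x hx
                                  rcases List.mem_append.1 hx with hx | hx
                                  · exact h x hx
                                  · simp at hx; simpa [hx] using hc)]
      simp

theorem hex_IP_eq_alt (ip : String) : hex_IP ip = hex_IP_alt ip := by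
  exact congrArg String.ofList
    (by simpa using loopA_eq_hexB ip.toList [] [] (by simp))

-- ===== VERDICT (by name: the statement is the Claim_ definition above) =====
theorem hex_IP_spec : Claim_equal_hex_IP := by
  intro ip _ _
  unfold Spec_hex_IP
  exact hex_IP_eq_alt ip
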